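-- pv_equiv track=rewrite | github.com/Merry360-X/Merry360x | api/ai-trip-advisor.py | _compact_reply_text
-- ===== SOURCE A (Python) =====
-- _MAX_REPLY_CHARS = 250
--
-- _MAX_REPLY_LINES = 4
--
-- def _compact_reply_text(text: str) -> str:
--     lines = [ln.rstrip() for ln in str(text or "").splitlines()]
--     compact = []
--     non_empty_count = 0
--     for ln in lines:
--         if ln.strip() == "":
--             if compact and compact[-1] != "":
--                 compact.append("")
--             continue
--         compact.append(ln)
--         non_empty_count += 1
--         if non_empty_count >= _MAX_REPLY_LINES:
--             break
--
--     out = "\n".join(compact).strip()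
--     if len(out) > _MAX_REPLY_CHARS:
--         out = out[: _MAX_REPLY_CHARS - 1].rstrip() + "…"
--     return out
-- ===== SOURCE B (Python) =====
-- _MAX_REPLY_CHARS = 250
--
-- _MAX_REPLY_LINES = 4
--
-- def _compact_reply_text(text: str) -> str:
--     # Staged pipeline, no scan state: enumerate the rstripped lines, filter to
--     # the non-empty ones, slice to the first 4 index/line pairs; a paragraph
--     # break goes before a kept line exactly when its index is more than one
--     # past the previous kept index (everything between kept lines is blank).
--     lines = [ln.rstrip() for ln in str(text or "").splitlines()]
--     kept = [(i, ln) for i, ln in enumerate(lines) if ln.strip() != ""][:_MAX_REPLY_LINES]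
--     out = ""
--     prev = None
--     for i, ln in kept:
--         if prev is not None:
--             out += "\n\n" if i - prev > 1 else "\n"
--         out += ln
--         prev = i
--     out = out.strip()
--     if len(out) > _MAX_REPLY_CHARS:
--         out = out[: _MAX_REPLY_CHARS - 1].rstrip() + "…"
--     return out
-- ===== Notes on version B (the rewrite author's own statement) =====
-- stated objective: alternative
-- what changed: A runs a stateful scan with a non-empty counter, an early break and empty-string sentinel elements that a join turns into paragraph breaks; B instead filters the enumerated non-empty lines, slices off the first 4 index/line pairs, and decides each separator by index distance (i - prev > 1 means a blank line sat between, so a paragraph break).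
import Mathlib
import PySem

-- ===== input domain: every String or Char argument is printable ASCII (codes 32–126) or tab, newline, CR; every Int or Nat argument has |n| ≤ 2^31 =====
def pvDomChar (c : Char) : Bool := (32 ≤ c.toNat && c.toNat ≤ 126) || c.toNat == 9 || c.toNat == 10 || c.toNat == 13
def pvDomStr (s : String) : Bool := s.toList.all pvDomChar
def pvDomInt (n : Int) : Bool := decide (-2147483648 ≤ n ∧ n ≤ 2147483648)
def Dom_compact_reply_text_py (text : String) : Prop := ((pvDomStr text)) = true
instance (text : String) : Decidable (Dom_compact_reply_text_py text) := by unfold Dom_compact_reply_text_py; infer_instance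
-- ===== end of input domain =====

-- B replaces A's stateful scan (counter, break, empty-string sentinels + join)
-- by a staged pipeline: filter the enumerated non-empty lines, slice to the
-- first 4 pairs, separators by index distance; same return value.

-- ===== PORT A =====
-- A's for-loop over the rstripped lines: state (compact, non_empty_count)
def pvALoop : List (List Char) → List (List Char) → Nat → List (List Char)
  | [], compact, _ => compact
  | ln :: rest, compact, cnt =>
    if PySem.Chars.strip ln = [] then
      if compact ≠ [] ∧ compact.getLast? ≠ some [] then pvALoop rest (compact ++ [[]]) cnt
      else pvALoop rest compact cnt
    else
      if cnt + 1 ≥ 4 then compact ++ [ln]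
      else pvALoop rest (compact ++ [ln]) (cnt + 1)

def compact_reply_text_py (text : String) : String :=
  let t := if text = "" then "" else text          -- str(text or "")
  let lines := (PySem.Chars.splitlines t.toList).map PySem.Chars.rstrip
  let compact := pvALoop lines [] 0
  let out := PySem.Chars.strip (PySem.Chars.join ['\n'] compact)
  let out := if out.length > 250 then
      PySem.Chars.rstrip (PySem.List.slice out none (some 249)) ++ ['…']  -- out[:249].rstrip() + '…'
    else out
  String.ofList out

-- ===== PORT B =====
-- B's render loop: 'prev' is the index of the previously emitted line (None first)
def pvBRender : Option Int → List (Int × List Char) → List Char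
  | _, [] => []
  | prev, (i, ln) :: rest =>
    (match prev with
     | none => []
     | some p => if i - p > 1 then ['\n', '\n'] else ['\n']) ++ ln ++ pvBRender (some i) rest

def compact_reply_text_py_alt (text : String) : String :=
  let t := if text = "" then "" else text          -- str(text or "")
  let lines := (PySem.Chars.splitlines t.toList).map PySem.Chars.rstrip
  -- [(i, ln) for i, ln in enumerate(lines) if ln.strip() != ""][:4]
  let kept := ((PySem.List.enumerate lines).filter
      (fun p => !(PySem.Chars.strip p.2).isEmpty)).take 4
  let out := PySem.Chars.strip (pvBRender none kept)
  let out := if out.length > 250 then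
      PySem.Chars.rstrip (PySem.List.slice out none (some 249)) ++ ['…']  -- out[:249].rstrip() + '…'
    else out
  String.ofList out

-- ===== PRECONDITION & SPEC =====
def Spec_compact_reply_text_py (text : String) (out : String) : Prop := out = compact_reply_text_py_alt text
instance (text : String) (out : String) : Decidable (Spec_compact_reply_text_py text out) := by unfold Spec_compact_reply_text_py; infer_instance

-- ===== CLAIM (what is proved, stated in full; the proofs are below) =====
def Claim_equal_compact_reply_text_py : Prop := ∀ (text : String), Dom_compact_reply_text_py text → Spec_compact_reply_text_py text (compact_reply_text_py text)

-- ===== LEMMAS AND PROOFS =====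

-- proof-side intermediate: the kept lines paired with a "blank seen since last kept" flag
def pvGScan : List (List Char) → Nat → Bool → List (List Char × Bool)
  | [], _, _ => []
  | ln :: rest, cnt, gap =>
    if PySem.Chars.strip ln = [] then pvGScan rest cnt true
    else (ln, gap) :: (if cnt + 1 ≥ 4 then [] else pvGScan rest (cnt + 1) false)

-- rendering of the flagged form
def pvOldTail : List (List Char × Bool) → List Char
  | [] => []
  | (ln, g) :: rest => (if g then ['\n', '\n'] else ['\n']) ++ ln ++ pvOldTail rest

def pvOldRender : List (List Char × Bool) → List Char
  | [] => []
  | (ln, _) :: rest => ln ++ pvOldTail rest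

-- the tail of A's "\n".join: a '\n' in front of every element
def pvJTail (d : List (List Char)) : List Char := d.flatMap (fun x => '\n' :: x)

lemma pvJoin_cons (l : List Char) (d : List (List Char)) :
    PySem.Chars.join ['\n'] (l :: d) = l ++ pvJTail d := by
  induction d generalizing l with
  | nil => simp [PySem.Chars.join, pvJTail, List.intercalate]
  | cons x xs ih =>
    simp only [PySem.Chars.join, List.intercalate] at *
    simp [List.intersperse, pvJTail, List.flatMap] at *
    simpa [List.append_assoc] using congrArg (fun z => l ++ '\n' :: z) (by simpa using ih x)

-- the suffix A's loop appends once compact is non-empty (lastBlank = "compact ends with ''")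
def pvADelta : List (List Char) → Nat → Bool → List (List Char)
  | [], _, _ => []
  | ln :: rest, cnt, lastBlank =>
    if PySem.Chars.strip ln = [] then
      if lastBlank then pvADelta rest cnt true
      else [] :: pvADelta rest cnt true
    else
      ln :: (if cnt + 1 ≥ 4 then [] else pvADelta rest (cnt + 1) false)

lemma strip_ne_nil_imp {l : List Char} (h : PySem.Chars.strip l ≠ []) : l ≠ [] := by
  intro hl; exact h (by simp [hl, PySem.Chars.strip, PySem.Chars.lstrip, PySem.Chars.rstrip])

lemma pvALoop_delta : ∀ (lines compact : List (List Char)) (cnt : Nat) (lastBlank : Bool),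
    compact ≠ [] → (lastBlank = decide (compact.getLast? = some [])) →
    pvALoop lines compact cnt = compact ++ pvADelta lines cnt lastBlank := by
  intro lines
  induction lines with
  | nil => intro compact cnt lb _ _; simp [pvALoop, pvADelta]
  | cons ln rest ih =>
    intro compact cnt lb hne hlb
    simp only [pvALoop, pvADelta]
    by_cases hs : PySem.Chars.strip ln = []
    · simp only [hs, if_true]
      by_cases hlast : compact.getLast? = some []
      · have : lb = true := by simp [hlb, hlast]
        subst this
        have : ¬ (compact ≠ [] ∧ compact.getLast? ≠ some []) := by
          intro ⟨_, h2⟩; exact h2 hlast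
        rw [if_neg this, if_pos rfl]
        exact ih compact cnt true hne hlb
      · have : lb = false := by simp [hlb, hlast]
        subst this
        have hcond : compact ≠ [] ∧ compact.getLast? ≠ some [] := ⟨hne, hlast⟩
        rw [if_pos hcond, if_neg (by simp)]
        rw [ih (compact ++ [[]]) cnt true (by simp) (by simp)]
        simp
    · rw [if_neg hs, if_neg hs]
      by_cases hc : cnt + 1 ≥ 4
      · simp [hc]
      · rw [if_neg hc, if_neg hc]
        rw [ih (compact ++ [ln]) (cnt + 1) false (by simp)
          (by simp [List.getLast?_append, strip_ne_nil_imp hs])]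
        simp

lemma rstrip_append_newline (x : List Char) :
    PySem.Chars.rstrip (x ++ ['\n']) = PySem.Chars.rstrip x := by
  simp [PySem.Chars.rstrip, PySem.Chars.isspace]

lemma strip_append_newline (x : List Char) :
    PySem.Chars.strip (x ++ ['\n']) = PySem.Chars.strip x := by
  simp only [PySem.Chars.strip, PySem.Chars.lstrip, List.dropWhile_append]
  by_cases h : List.dropWhile PySem.Chars.isspace x = []
  · simp [h, List.dropWhile, PySem.Chars.isspace, PySem.Chars.rstrip]
  · have h' : (List.dropWhile PySem.Chars.isspace x).isEmpty = false := by
      simpa using h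
    simp only [h', Bool.false_eq_true, if_false]
    exact rstrip_append_newline _

-- core: A's joined tail equals the flagged rendered tail up to a trailing '\n'
lemma pvTail_rel : ∀ (rest : List (List Char)) (cnt : Nat) (gap : Bool),
    ∃ t, (t = ([] : List Char) ∨ t = ['\n']) ∧
      (if gap then ['\n'] else []) ++ pvJTail (pvADelta rest cnt gap) =
        pvOldTail (pvGScan rest cnt gap) ++ t := by
  intro rest
  induction rest with
  | nil =>
    intro cnt gap
    cases gap
    · exact ⟨[], Or.inl rfl, by simp [pvADelta, pvGScan, pvJTail, pvOldTail]⟩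
    · exact ⟨['\n'], Or.inr rfl, by simp [pvADelta, pvGScan, pvJTail, pvOldTail]⟩
  | cons ln r ih =>
    intro cnt gap
    by_cases hs : PySem.Chars.strip ln = []
    · obtain ⟨t, ht, heq⟩ := ih cnt true
      refine ⟨t, ht, ?_⟩
      cases gap with
      | false =>
        simp only [pvADelta, pvGScan, hs]
        simpa [pvJTail] using heq
      | true =>
        simp only [pvADelta, pvGScan, hs, if_true]
        simpa using heq
    · by_cases hc : cnt + 1 ≥ 4
      · refine ⟨[], Or.inl rfl, ?_⟩
        simp only [pvADelta, pvGScan, if_neg hs, if_pos hc]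
        cases gap <;> simp [pvJTail, pvOldTail]
      · obtain ⟨t, ht, heq⟩ := ih (cnt + 1) false
        have heq' : pvJTail (pvADelta r (cnt + 1) false) =
            pvOldTail (pvGScan r (cnt + 1) false) ++ t := by simpa using heq
        refine ⟨t, ht, ?_⟩
        simp only [pvADelta, pvGScan, if_neg hs, if_neg hc]
        cases gap <;>
          (simp [pvJTail, pvOldTail, List.append_assoc]; simpa [pvJTail] using heq')

-- A's stripped body equals the stripped flagged rendering
lemma pvBody_eq' : ∀ (ls : List (List Char)) (gap : Bool),
    PySem.Chars.strip (PySem.Chars.join ['\n'] (pvALoop ls [] 0)) =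
      PySem.Chars.strip (pvOldRender (pvGScan ls 0 gap)) := by
  intro ls
  induction ls with
  | nil => intro gap; simp [pvALoop, pvGScan, pvOldRender, PySem.Chars.join, List.intercalate]
  | cons ln rest ih =>
    intro gap
    by_cases hs : PySem.Chars.strip ln = []
    · rw [show pvALoop (ln :: rest) [] 0 = pvALoop rest [] 0 by simp [pvALoop, hs]]
      rw [show pvGScan (ln :: rest) 0 gap = pvGScan rest 0 true by simp [pvGScan, hs]]
      exact ih true
    · have h4 : ¬ (0 + 1 ≥ 4) := by norm_num
      rw [show pvALoop (ln :: rest) [] 0 = pvALoop rest [ln] 1 by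
        simp [pvALoop, hs]]
      rw [show pvGScan (ln :: rest) 0 gap = (ln, gap) :: pvGScan rest 1 false by
        simp [pvGScan, hs]]
      rw [pvALoop_delta rest [ln] 1 false (by simp) (by simp [strip_ne_nil_imp hs])]
      simp only [List.singleton_append, pvJoin_cons, pvOldRender]
      obtain ⟨t, ht, heq⟩ := pvTail_rel rest 1 false
      have heq' : pvJTail (pvADelta rest 1 false) =
          pvOldTail (pvGScan rest 1 false) ++ t := by simpa using heq
      rw [heq']
      rcases ht with h | h
      · simp [h]
      · subst h
        rw [← List.append_assoc, strip_append_newline]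

-- B's filter/slice/index-distance pipeline renders the flagged form: tail version.
-- p is the index of the last kept line, k the current scan position; every line
-- strictly between them has been scanned and dropped as blank, so "a blank was
-- seen since the last kept line" is exactly p + 1 < k.
lemma pvB_tail_eq : ∀ (lines : List (List Char)) (k p : Int) (cnt : Nat),
    p < k → cnt < 4 →
    pvBRender (some p)
        (((PySem.List.enumerate lines k).filter
            (fun q => !(PySem.Chars.strip q.2).isEmpty)).take (4 - cnt)) =
      pvOldTail (pvGScan lines cnt (decide (p + 1 < k))) := by
  intro lines
  induction lines with
  | nil => intro k p cnt _ _; simp [PySem.List.enumerate_nil, pvBRender, pvGScan, pvOldTail]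
  | cons ln rest ih =>
    intro k p cnt hpk hcnt
    rw [PySem.List.enumerate_cons]
    by_cases hs : PySem.Chars.strip ln = []
    · have h1 : (!(PySem.Chars.strip ln).isEmpty) = false := by simp [hs]
      rw [show pvGScan (ln :: rest) cnt (decide (p + 1 < k)) = pvGScan rest cnt true by
        simp [pvGScan, hs]]
      have := ih (k + 1) p cnt (by omega) hcnt
      rw [show decide (p + 1 < k + 1) = true by simp; omega] at this
      simpa [List.filter, h1] using this
    · have h1 : (!(PySem.Chars.strip ln).isEmpty) = true := by simp [hs]
      have htake : 4 - cnt = (3 - cnt) + 1 := by omega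
      rw [show pvGScan (ln :: rest) cnt (decide (p + 1 < k)) =
          (ln, decide (p + 1 < k)) ::
            (if cnt + 1 ≥ 4 then [] else pvGScan rest (cnt + 1) false) by
        simp [pvGScan, hs]]
      simp only [List.filter, h1, htake, List.take_succ_cons, pvBRender, pvOldTail]
      have hsep : (if k - p > 1 then ['\n', '\n'] else ['\n']) =
          (if decide (p + 1 < k) = true then ['\n', '\n'] else ['\n']) := by
        by_cases h : p + 1 < k <;> simp [h, show (k - p > 1) ↔ (p + 1 < k) by omega]
      rw [hsep]
      by_cases hc : cnt + 1 ≥ 4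
      · have : 3 - cnt = 0 := by omega
        simp [hc, this, pvBRender, pvOldTail]
      · have := ih (k + 1) k (cnt + 1) (by omega) (by omega)
        rw [show decide (k + 1 < k + 1) = false by simp] at this
        rw [if_neg hc]
        have h3 : 4 - (cnt + 1) = 3 - cnt := by omega
        rw [h3] at this
        rw [this]

lemma pvB_render_eq : ∀ (lines : List (List Char)) (k : Int) (gap : Bool),
    pvBRender none
        (((PySem.List.enumerate lines k).filter
            (fun q => !(PySem.Chars.strip q.2).isEmpty)).take 4) =
      pvOldRender (pvGScan lines 0 gap) := by
  intro lines
  induction lines with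
  | nil => intro k gap; simp [PySem.List.enumerate_nil, pvBRender, pvGScan, pvOldRender]
  | cons ln rest ih =>
    intro k gap
    rw [PySem.List.enumerate_cons]
    by_cases hs : PySem.Chars.strip ln = []
    · have h1 : (!(PySem.Chars.strip ln).isEmpty) = false := by simp [hs]
      rw [show pvGScan (ln :: rest) 0 gap = pvGScan rest 0 true by simp [pvGScan, hs]]
      simpa [List.filter, h1] using ih (k + 1) true
    · have h1 : (!(PySem.Chars.strip ln).isEmpty) = true := by simp [hs]
      rw [show pvGScan (ln :: rest) 0 gap =
          (ln, gap) :: pvGScan rest 1 false by simp [pvGScan, hs]]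
      simp only [List.filter, h1, pvOldRender, show (4 : Nat) = 3 + 1 from rfl,
        List.take_succ_cons, pvBRender]
      have := pvB_tail_eq rest (k + 1) k 1 (by omega) (by omega)
      rw [show decide (k + 1 < k + 1) = false by simp] at this
      rw [show (4 : Nat) - 1 = 3 from rfl] at this
      rw [this]
      simp

-- ===== VERDICT (by name: the statement is the Claim_ definition above) =====
theorem compact_reply_text_py_spec : Claim_equal_compact_reply_text_py := by
  intro text _
  unfold Spec_compact_reply_text_py compact_reply_text_py compact_reply_text_py_alt
  simp only []
  rw [pvB_render_eq _ 0 false, pvBody_eq' _ false]
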